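-- pv_equiv track=rewrite | github.com/KevinCL16/Customized-Agent-Framework | workspace/sklearn_pandas_errors/merge_multiple_errors.py | restore_original_code
-- ===== SOURCE A (Python) =====
-- def restore_original_code(modified_code, error_versions):
--     """
--     Restore the initial error-free code by replacing modified lines with original lines,
--     handling missing or empty values.
--     """
--     lines = modified_code.split("\n")
--     for error in error_versions:
--         original_line = error.get("original_line", "").strip()
--         modified_line = error.get("modified_line", "").strip()
--         if original_line and modified_line:
--             # Replace modified lines with original lines
--             lines = [original_line if line.strip() == modified_line else line for line in lines]
--     return "\n".join(lines)
-- ===== SOURCE B (Python) =====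
-- def restore_original_code(modified_code, error_versions):
--     """
--     Restore the initial error-free code by replacing modified lines with original lines,
--     handling missing or empty values.
--     """
--     # Collect the valid replacement rules once.
--     rules = []
--     for error in error_versions:
--         original_line = error.get("original_line", "").strip()
--         modified_line = error.get("modified_line", "").strip()
--         if original_line and modified_line:
--             rules.append((modified_line, original_line))
--
--     def resolve(key):
--         # Final text for a line whose stripped content is `key`,
--         # or None if no rule ever fires (the line is kept verbatim).
--         cur, hit = key, False
--         for modified_line, original_line in rules:
--             if cur == modified_line:
--                 cur, hit = original_line, True
--         return cur if hit else None
--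
--     # Memoise per distinct stripped line content.
--     cache = {}
--     out = []
--     for line in modified_code.split("\n"):
--         key = line.strip()
--         if key not in cache:
--             cache[key] = resolve(key)
--         val = cache[key]
--         out.append(line if val is None else val)
--     return "\n".join(out)
-- ===== Notes on version B (the rewrite author's own statement) =====
-- stated objective: alternative
-- what changed: B extracts the valid (modified, original) rules once, then replaces A's per-error whole-list rewrites with a per-line resolver that folds a line's stripped content through the rules and memoises the result in a dict keyed by stripped content, so each distinct stripped line is resolved only once.
import Mathlib
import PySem

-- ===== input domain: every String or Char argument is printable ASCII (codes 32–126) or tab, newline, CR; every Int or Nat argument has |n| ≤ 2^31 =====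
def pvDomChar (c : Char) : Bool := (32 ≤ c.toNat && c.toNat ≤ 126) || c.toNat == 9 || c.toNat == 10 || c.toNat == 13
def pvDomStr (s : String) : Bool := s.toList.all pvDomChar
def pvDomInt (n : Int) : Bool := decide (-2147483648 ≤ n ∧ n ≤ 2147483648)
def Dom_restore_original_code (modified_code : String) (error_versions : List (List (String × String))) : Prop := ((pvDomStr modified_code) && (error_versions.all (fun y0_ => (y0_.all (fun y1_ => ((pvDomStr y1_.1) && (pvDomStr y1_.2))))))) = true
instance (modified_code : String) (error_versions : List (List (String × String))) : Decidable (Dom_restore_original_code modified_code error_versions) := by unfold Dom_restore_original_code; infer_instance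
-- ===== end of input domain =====

-- B replaces A's one-list-rewrite-per-error with rule extraction plus a memoised per-key resolver:
-- each distinct stripped line content is resolved through the rules once and cached in a dict (same return value; alternative algorithm).

-- ===== PORT A =====
def restore_original_code (modified_code : String) (error_versions : List (List (String × String))) : String :=
  -- modified_code.split("\n"): sep "\n" ≠ "", so split? is always some; getD only totalizes
  let lines := (PySem.Str.split? modified_code "\n").getD []
  let lines := error_versions.foldl (fun lines error =>
    let original_line := PySem.Str.strip (PySem.Dict.getD (PySem.Dict.mk error) "original_line" "")
    let modified_line := PySem.Str.strip (PySem.Dict.getD (PySem.Dict.mk error) "modified_line" "")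
    if original_line ≠ "" && modified_line ≠ "" then
      lines.map (fun line => if PySem.Str.strip line == modified_line then original_line else line)
    else lines) lines
  PySem.Str.join "\n" lines

-- ===== PORT B =====
-- resolve(key) from Source B: fold the rules over the stripped content; none = no rule ever fired
def pvResolve (rules : List (String × String)) (key : String) : Option String :=
  let r := rules.foldl (fun (st : String × Bool) rule =>
    if st.1 == rule.1 then (rule.2, true) else st) (key, false)
  if r.2 then some r.1 else none

def restore_original_code_alt (modified_code : String) (error_versions : List (List (String × String))) : String :=
  let rules := error_versions.foldl (fun acc error =>
    let original_line := PySem.Str.strip (PySem.Dict.getD (PySem.Dict.mk error) "original_line" "")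
    let modified_line := PySem.Str.strip (PySem.Dict.getD (PySem.Dict.mk error) "modified_line" "")
    if original_line ≠ "" && modified_line ≠ "" then acc ++ [(modified_line, original_line)]
    else acc) []
  -- modified_code.split("\n"): sep "\n" ≠ "", so split? is always some; getD only totalizes
  let lines := (PySem.Str.split? modified_code "\n").getD []
  let st := lines.foldl (fun (st : PySem.Dict String (Option String) × List String) line =>
    let key := PySem.Str.strip line
    let cache := if st.1.contains key then st.1 else st.1.insert key (pvResolve rules key)
    let val := cache.getD key none
    (cache, st.2 ++ [val.getD line])) (PySem.Dict.empty, [])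
  PySem.Str.join "\n" st.2

-- ===== PRECONDITION & SPEC =====
def Spec_restore_original_code (modified_code : String) (error_versions : List (List (String × String))) (out : String) : Prop := out = restore_original_code_alt modified_code error_versions
instance (modified_code : String) (error_versions : List (List (String × String))) (out : String) : Decidable (Spec_restore_original_code modified_code error_versions out) := by unfold Spec_restore_original_code; infer_instance

-- ===== CLAIM =====
def Claim_equal_restore_original_code : Prop := ∀ (modified_code : String) (error_versions : List (List (String × String))), Dom_restore_original_code modified_code error_versions → Spec_restore_original_code modified_code error_versions (restore_original_code modified_code error_versions)

-- ===== LEMMAS AND PROOFS =====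

-- one per-line replacement step of A, for a rule r = (modified, original)
def pvStep (line : String) (r : String × String) : String :=
  if PySem.Str.strip line == r.1 then r.2 else line

-- the rule extracted from one error dict
def pvRule (error : List (String × String)) : String × String :=
  (PySem.Str.strip (PySem.Dict.getD (PySem.Dict.mk error) "modified_line" ""),
   PySem.Str.strip (PySem.Dict.getD (PySem.Dict.mk error) "original_line" ""))

def pvValid (error : List (String × String)) : Bool :=
  PySem.Str.strip (PySem.Dict.getD (PySem.Dict.mk error) "original_line" "") ≠ "" &&
  PySem.Str.strip (PySem.Dict.getD (PySem.Dict.mk error) "modified_line" "") ≠ ""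

-- strip is idempotent (list side)
theorem pvRstrip_idem (l : List Char) :
    PySem.Chars.rstrip (PySem.Chars.rstrip l) = PySem.Chars.rstrip l := by
  simp [PySem.Chars.rstrip, List.dropWhile_idempotent]

theorem pvLstrip_rstrip (l : List Char) (h : PySem.Chars.lstrip l = l) :
    PySem.Chars.lstrip (PySem.Chars.rstrip l) = PySem.Chars.rstrip l := by
  unfold PySem.Chars.lstrip PySem.Chars.rstrip
  obtain ⟨t, ht⟩ := List.dropWhile_suffix (l := l.reverse) (p := PySem.Chars.isspace)
  have hl : l = (List.dropWhile PySem.Chars.isspace l.reverse).reverse ++ t.reverse := by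
    have := congrArg List.reverse ht
    simpa using this.symm
  cases hd : (List.dropWhile PySem.Chars.isspace l.reverse).reverse with
  | nil => simp
  | cons c rest =>
    have hc : ¬ PySem.Chars.isspace c = true := by
      have h0 : 0 < l.length := by
        rw [hl, hd]; simp
      have := (List.dropWhile_eq_self_iff.mp (by simpa [PySem.Chars.lstrip] using h)) h0
      have hlc : l[0] = c := by
        have : l = c :: (rest ++ t.reverse) := by rw [hl, hd]; simp
        simp [this]
      rwa [hlc] at this
    simp [hc]

theorem pvChars_strip_idem (l : List Char) :
    PySem.Chars.strip (PySem.Chars.strip l) = PySem.Chars.strip l := by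
  unfold PySem.Chars.strip
  rw [pvLstrip_rstrip _ (by simp [PySem.Chars.lstrip, List.dropWhile_idempotent]),
    pvRstrip_idem]

theorem pvStrip_idem (s : String) :
    PySem.Str.strip (PySem.Str.strip s) = PySem.Str.strip s := by
  unfold PySem.Str.strip
  rw [String.toList_ofList, pvChars_strip_idem]

-- after a rule has fired, the resolver fold tracks A's per-line fold exactly
theorem pvHit (rules : List (String × String)) (cur : String)
    (hr : ∀ r ∈ rules, PySem.Str.strip r.2 = r.2)
    (hc : PySem.Str.strip cur = cur) :
    rules.foldl (fun (st : String × Bool) rule =>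
      if st.1 == rule.1 then (rule.2, true) else st) (cur, true)
    = (rules.foldl pvStep cur, true) := by
  induction rules generalizing cur with
  | nil => rfl
  | cons r t ih =>
    simp only [List.foldl_cons, pvStep, hc]
    by_cases h : cur == r.1
    · simp only [h, if_pos]
      exact ih r.2 (fun x hx => hr x (List.mem_cons_of_mem _ hx)) (hr r (by simp))
    · simp only [h]
      exact ih cur (fun x hx => hr x (List.mem_cons_of_mem _ hx)) hc

-- resolve of the stripped content reproduces A's per-line fold over the rules
theorem pvResolve_eq_fold (rules : List (String × String)) (line : String)
    (hr : ∀ r ∈ rules, PySem.Str.strip r.2 = r.2) :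
    (pvResolve rules (PySem.Str.strip line)).getD line = rules.foldl pvStep line := by
  induction rules generalizing line with
  | nil => rfl
  | cons r t ih =>
    simp only [pvResolve, List.foldl_cons, pvStep]
    by_cases h : PySem.Str.strip line == r.1
    · simp only [h, if_pos]
      rw [pvHit t r.2 (fun x hx => hr x (List.mem_cons_of_mem _ hx)) (hr r (by simp))]
      rfl
    · simp only [h, Bool.false_eq_true, if_false]
      exact ih line (fun x hx => hr x (List.mem_cons_of_mem _ hx))

-- the memoising fold over the lines produces the per-line resolve results
theorem pvCache (rules : List (String × String)) (lines : List String)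
    (cache : PySem.Dict String (Option String)) (out : List String)
    (hinv : ∀ k v, cache.get? k = some v → v = pvResolve rules k) :
    (lines.foldl (fun (st : PySem.Dict String (Option String) × List String) line =>
      let key := PySem.Str.strip line
      let cache := if st.1.contains key then st.1 else st.1.insert key (pvResolve rules key)
      let val := cache.getD key none
      (cache, st.2 ++ [val.getD line])) (cache, out)).2
    = out ++ lines.map (fun line => (pvResolve rules (PySem.Str.strip line)).getD line) := by
  induction lines generalizing cache out with
  | nil => simp
  | cons line t ih =>
    simp only [List.foldl_cons, List.map_cons]
    set key := PySem.Str.strip line with hkey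
    by_cases h : cache.contains key
    · have hv : cache.getD key none = pvResolve rules key := by
        rcases (PySem.Dict.contains_eq_isSome_get? (d := cache) (k := key)) ▸ h with h'
        cases hg : cache.get? key with
        | none => rw [hg] at h'; simp at h'
        | some v =>
          rw [PySem.Dict.getD_of_get?_eq_some cache none hg]
          exact hinv key v hg
      simp only [h, if_pos, hv]
      rw [ih cache _ hinv, List.append_assoc]
      rfl
    · have hv : (cache.insert key (pvResolve rules key)).getD key none
          = pvResolve rules key := by
        exact PySem.Dict.getD_of_get?_eq_some _ none (PySem.Dict.get?_insert_self _ _ _)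
      simp only [h, Bool.false_eq_true, if_false, hv]
      rw [ih (cache.insert key (pvResolve rules key)) _ ?_, List.append_assoc]
      · rfl
      · intro k v hg
        rw [PySem.Dict.get?_insert] at hg
        split at hg
        · next heq => cases hg; rw [heq]
        · exact hinv k v hg
  
-- A's loop over error_versions equals mapping each line through the fold of the extracted rules
theorem pvMain (evs : List (List (String × String))) (lines : List String) :
    evs.foldl (fun lines error =>
      let original_line := PySem.Str.strip (PySem.Dict.getD (PySem.Dict.mk error) "original_line" "")
      let modified_line := PySem.Str.strip (PySem.Dict.getD (PySem.Dict.mk error) "modified_line" "")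
      if original_line ≠ "" && modified_line ≠ "" then
        lines.map (fun line => if PySem.Str.strip line == modified_line then original_line else line)
      else lines) lines
    = lines.map (fun line => ((evs.filter pvValid).map pvRule).foldl pvStep line) := by
  induction evs generalizing lines with
  | nil => simp
  | cons e t ih =>
    simp only [List.foldl_cons, List.filter_cons]
    by_cases h : pvValid e = true
    · have hc : (PySem.Str.strip (PySem.Dict.getD (PySem.Dict.mk e) "original_line" "") ≠ "" &&
          PySem.Str.strip (PySem.Dict.getD (PySem.Dict.mk e) "modified_line" "") ≠ "") = true := h
      simp only [h, if_pos, hc]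
      rw [ih, List.map_map]
      apply List.map_congr_left
      intro line _
      simp only [Function.comp, List.map_cons, List.foldl_cons, pvStep, pvRule]
    · have hc : ¬ ((PySem.Str.strip (PySem.Dict.getD (PySem.Dict.mk e) "original_line" "") ≠ "" &&
          PySem.Str.strip (PySem.Dict.getD (PySem.Dict.mk e) "modified_line" "") ≠ "") = true) := h
      simp only [h, hc, if_false, Bool.false_eq_true]
      rw [ih]

-- B's rule accumulator equals filter-then-map
theorem pvRules (evs : List (List (String × String))) :
    evs.foldl (fun acc error =>
      let original_line := PySem.Str.strip (PySem.Dict.getD (PySem.Dict.mk error) "original_line" "")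
      let modified_line := PySem.Str.strip (PySem.Dict.getD (PySem.Dict.mk error) "modified_line" "")
      if original_line ≠ "" && modified_line ≠ "" then acc ++ [(modified_line, original_line)]
      else acc) []
    = (evs.filter pvValid).map pvRule := by
  have := PySem.List.foldl_append_if (l := evs) (acc := ([] : List (String × String)))
    (p := pvValid) (f := pvRule)
  simp only [List.nil_append] at this
  rw [← this]
  apply PySem.List.foldl_congr_mem
  intro acc e _
  simp only [pvValid, pvRule]

-- ===== VERDICT =====
theorem restore_original_code_spec : Claim_equal_restore_original_code := by
  intro mc evs _
  unfold Spec_restore_original_code restore_original_code restore_original_code_alt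
  dsimp only
  rw [pvMain, pvRules]
  have hr : ∀ r ∈ (evs.filter pvValid).map pvRule, PySem.Str.strip r.2 = r.2 := by
    intro r hrm
    rcases List.mem_map.mp hrm with ⟨e, _, he⟩
    rw [← he]
    exact pvStrip_idem _
  rw [pvCache ((evs.filter pvValid).map pvRule) _ PySem.Dict.empty []
    (fun k v hg => by simp [PySem.Dict.get?_empty] at hg)]
  simp only [List.nil_append]
  congr 1
  apply List.map_congr_left
  intro line _
  exact (pvResolve_eq_fold _ line hr).symm
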